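-- pv_equiv track=rewrite | github.com/yedini/Algorithm | 코테대비문제/메뉴리뉴얼.py | solution
-- ===== SOURCE A (Python) =====
-- from itertools import combinations
--
-- def solution(orders, course):
--     answer = []
--     for n in course:
--         cand = dict()     # 후보 메뉴구성 + 시킨 횟수를 cand에 담음
--         for order in orders:
--             if len(order) >= n:
--                 l = list(combinations(list(order), n))
--                 for ll in l:
--                     lll = ''.join(sorted(ll))
--                     if lll in cand.keys():
--                         cand[lll] += 1
--                     else:
--                         cand[lll] = 1
--         if cand:
--             maxv = max(cand.values())  # cand에 담긴 후보 메뉴구성 중 가장 많이 나간 구성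
--             if maxv >= 2:  # 2번 이상 시킨 경우에만 해당!
--                 answer = answer + [k for k in cand.keys() if cand[k] == maxv] # answer에 메뉴구성을 추가
--     return sorted(answer)
-- ===== SOURCE B (Python) =====
-- def _combos(s, n):
--     """All length-n combination strings of s, chosen by position, in order."""
--     if n == 0:
--         return ['']
--     if not s:
--         return []
--     rest = s[1:]
--     return [s[0] + t for t in _combos(rest, n - 1)] + _combos(rest, n)
--
--
-- def solution(orders, course):
--     # Sort each order once, then emit already-sorted combination keys by
--     # recursion, accumulating them into one index (size -> key -> count)
--     # built in a single pass over orders; answer each course entry by a query.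
--     sizes = set(course)
--     index = {}
--     for order in orders:
--         s = ''.join(sorted(order))
--         for n in sizes:
--             if len(s) >= n:
--                 sub = index.get(n, {})
--                 for key in _combos(s, n):
--                     sub[key] = sub.get(key, 0) + 1
--                 index[n] = sub
--     answer = []
--     for n in course:
--         sub = index.get(n, {})
--         if sub:
--             maxv = max(sub.values())
--             if maxv >= 2:
--                 answer += [k for k in sub if sub[k] == maxv]
--     return sorted(answer)
-- ===== Notes on version B (the rewrite author's own statement) =====
-- stated objective: alternative
-- what changed: B replaces A's per-course-size rescan of all orders with itertools.combinations plus a per-combination sort by: sorting each order once, emitting already-sorted combination keys with a recursive generator, accumulating them in one pass into a size-keyed frequency index, and answering each course entry by a separate query pass over that index.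
import Mathlib
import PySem

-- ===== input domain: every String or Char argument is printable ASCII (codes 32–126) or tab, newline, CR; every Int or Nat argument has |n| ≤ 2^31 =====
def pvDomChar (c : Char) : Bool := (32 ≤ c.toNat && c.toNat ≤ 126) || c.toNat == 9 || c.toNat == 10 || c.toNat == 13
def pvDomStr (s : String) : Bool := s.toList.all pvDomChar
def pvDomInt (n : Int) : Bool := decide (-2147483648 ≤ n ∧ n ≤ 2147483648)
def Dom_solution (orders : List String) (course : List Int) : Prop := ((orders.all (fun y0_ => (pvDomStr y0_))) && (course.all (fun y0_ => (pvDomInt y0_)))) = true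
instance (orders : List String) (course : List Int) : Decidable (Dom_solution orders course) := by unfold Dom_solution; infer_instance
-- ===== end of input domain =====

-- B sorts each order once, emits already-sorted combination keys by a recursive generator and
-- accumulates them into one size-keyed frequency index in a single pass over orders, then answers
-- each course entry by a query pass; A rescans all orders (itertools.combinations + a sort per
-- combination) for every course size.

-- shared helper (these Python lines appear verbatim in both programs):
-- 'if cand: maxv = max(cand.values()); if maxv >= 2: answer += [k for k in cand if cand[k] == maxv]'
def pvQuery (cand : PySem.Dict String Int) (answer : List String) : List String :=
  match PySem.List.max? cand.values (fun v => v) with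
  | none => answer                                  -- 'if cand:' is false
  | some maxv =>
    if 2 ≤ maxv then
      answer ++ cand.keys.filter (fun k => decide (cand.getD k 0 = maxv))
    else answer

-- ===== PORT A =====
-- ''.join(sorted(ll))
def pvKeyA (ll : List Char) : String := String.mk (PySem.List.sorted ll (fun c => c) false)

-- A's inner loop: one candidate dict for course size n, built by rescanning ALL orders
-- (combinations(list(order), n): n.toNat is reached only for 0 ≤ n — a negative n raises
-- ValueError in Python and is excluded by Pre_solution)
def pvCandA (n : Int) (orders : List String) : PySem.Dict String Int :=
  orders.foldl (fun cand order =>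
    if n ≤ (order.toList.length : Int) then
      (PySem.List.combinations order.toList n.toNat).foldl (fun cand ll =>
        let lll := pvKeyA ll
        if cand.contains lll then
          cand.insert lll (cand.getD lll 0 + 1)
        else
          cand.insert lll 1) cand
    else cand) PySem.Dict.empty

def solution (orders : List String) (course : List Int) : List String :=
  let answer := course.foldl (fun answer n => pvQuery (pvCandA n orders) answer) []
  PySem.List.sorted answer (fun s => s) false

-- ===== PORT B =====
-- _combos(s, n): all length-n combination strings of s, chosen by position, in order
-- (Python strings built as char lists, joined by String.mk at the use site)
def pvCombosB (s : List Char) (n : Int) : List (List Char) :=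
  if n = 0 then [[]]
  else
    match s with
    | [] => []
    | x :: rest => (pvCombosB rest (n - 1)).map (fun t => x :: t) ++ pvCombosB rest n
termination_by structural s

-- the iteration order over the Python set 'sizes' is hash order; the result is independent of it
-- (each index entry depends only on its own size), so Set.ofList order is used
def solution_alt (orders : List String) (course : List Int) : List String :=
  let sizes := PySem.Set.ofList course
  let index := orders.foldl (fun index order =>
    let s := PySem.List.sorted order.toList (fun c => c) false
    sizes.foldl (fun index n =>
      if n ≤ (s.length : Int) then
        index.insert n ((pvCombosB s n).foldl
          (fun sub key => sub.insert (String.mk key) (sub.getD (String.mk key) 0 + 1))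
          (index.getD n PySem.Dict.empty))
      else index) index) PySem.Dict.empty
  let answer := course.foldl (fun answer n => pvQuery (index.getD n PySem.Dict.empty) answer) []
  PySem.List.sorted answer (fun s => s) false

-- ===== PRECONDITION & SPEC =====
-- Pre_ excludes exactly the inputs where A raises: a negative course size together with at least
-- one order makes combinations(order, n) raise ValueError (len(order) >= n holds for negative n).
def Pre_solution (orders : List String) (course : List Int) : Prop :=
  orders = [] ∨ ∀ n ∈ course, 0 ≤ n
instance (orders : List String) (course : List Int) : Decidable (Pre_solution orders course) := by unfold Pre_solution; infer_instance

def pvWitness_solution : List String × List Int := (["ab", "cab"], [2, 3])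

def Spec_solution (orders : List String) (course : List Int) (out : List String) : Prop := out = solution_alt orders course
instance (orders : List String) (course : List Int) (out : List String) : Decidable (Spec_solution orders course out) := by unfold Spec_solution; infer_instance

-- ===== CLAIM (what is proved, stated in full; the proofs are below) =====
def Claim_equal_solution : Prop := ∀ (orders : List String) (course : List Int), Dom_solution orders course → Pre_solution orders course → Spec_solution orders course (solution orders course)
-- ===== LEMMAS AND PROOFS =====

-- the lists of keys each program feeds, per course size n, into its counting dict
def pvKeysA (n : Int) (order : String) : List String :=
  if n ≤ (order.toList.length : Int) then (PySem.List.combinations order.toList n.toNat).map pvKeyA else []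

def pvKeysB (n : Int) (s : List Char) : List String :=
  if n ≤ (s.length : Int) then (pvCombosB s n).map String.mk else []

def sortc (order : String) : List Char := PySem.List.sorted order.toList (fun c => c) false

-- the part pvQuery appends to the answer
def pvTail (d : PySem.Dict String Int) : List String :=
  match PySem.List.max? d.values (fun v => v) with
  | none => []
  | some maxv =>
    if 2 ≤ maxv then d.keys.filter (fun k => decide (d.getD k 0 = maxv)) else []

theorem pvQuery_eq_append (d : PySem.Dict String Int) (ans : List String) :
    pvQuery d ans = ans ++ pvTail d := by
  rcases hm : PySem.List.max? d.values (fun v => v) with _ | m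
  · simp [pvQuery, pvTail, hm]
  · simp only [pvQuery, pvTail, hm]
    split <;> simp

-- 'if key in cand: cand[key] += 1 else: cand[key] = 1' is the counter update
theorem pvInner_eq (cand : PySem.Dict String Int) (lll : String) :
    (if cand.contains lll then cand.insert lll (cand.getD lll 0 + 1) else cand.insert lll 1)
      = cand.insert lll (cand.getD lll 0 + 1) := by
  by_cases h : cand.contains lll = true
  · simp [h]
  · simp only [Bool.not_eq_true] at h
    simp [h, PySem.Dict.getD_of_not_contains cand 0 h]

-- a fold of per-element folds is the fold over the flattened key list
theorem pvFoldl_flatMap {α : Type} (L : α → List String) (l : List α)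
    (e : PySem.Dict String Int) :
    l.foldl (fun d a => (L a).foldl (fun d k => d.insert k (d.getD k 0 + 1)) d) e
      = (l.flatMap L).foldl (fun d k => d.insert k (d.getD k 0 + 1)) e := by
  induction l generalizing e with
  | nil => rfl
  | cons a t ih => rw [List.foldl_cons, ih, List.flatMap_cons, List.foldl_append]

-- A's per-size dict is the counter of its key list
theorem pvCandA_eq_counter (n : Int) (orders : List String) :
    pvCandA n orders = PySem.Dict.counter (orders.flatMap (pvKeysA n)) := by
  unfold pvCandA
  have hstep : ∀ (cand : PySem.Dict String Int), ∀ order ∈ orders,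
      (if n ≤ (order.toList.length : Int) then
        (PySem.List.combinations order.toList n.toNat).foldl (fun cand ll =>
          let lll := pvKeyA ll
          if cand.contains lll then cand.insert lll (cand.getD lll 0 + 1)
          else cand.insert lll 1) cand
      else cand)
      = (pvKeysA n order).foldl (fun d k => d.insert k (d.getD k 0 + 1)) cand := by
    intro cand order _
    unfold pvKeysA
    split
    · rw [List.foldl_map]
      exact PySem.List.foldl_congr_mem _ _ _ _ (fun d ll _ => pvInner_eq d (pvKeyA ll))
    · rfl
  rw [PySem.List.foldl_congr_mem _ _
      (fun d order => (pvKeysA n order).foldl (fun d' k => d'.insert k (d'.getD k 0 + 1)) d) _ hstep,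
    pvFoldl_flatMap, PySem.Dict.foldl_insert_getD_add_one_eq_counter]

-- B's build step, seen through the projection at one size
def pvIdxStep (s : List Char) (index : PySem.Dict Int (PySem.Dict String Int)) (n : Int) :
    PySem.Dict Int (PySem.Dict String Int) :=
  if n ≤ (s.length : Int) then
    index.insert n ((pvCombosB s n).foldl
      (fun sub key => sub.insert (String.mk key) (sub.getD (String.mk key) 0 + 1))
      (index.getD n PySem.Dict.empty))
  else index

theorem pvIdxStep_getD_ne (s : List Char) (index : PySem.Dict Int (PySem.Dict String Int))
    (n m : Int) (hne : n ≠ m) :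
    (pvIdxStep s index m).getD n PySem.Dict.empty = index.getD n PySem.Dict.empty := by
  unfold pvIdxStep
  split
  · rw [PySem.Dict.getD_insert_of_ne _ _ _ hne]
  · rfl

theorem pvIdxStep_getD_self (s : List Char) (index : PySem.Dict Int (PySem.Dict String Int))
    (n : Int) :
    (pvIdxStep s index n).getD n PySem.Dict.empty
      = (pvKeysB n s).foldl (fun d k => d.insert k (d.getD k 0 + 1))
          (index.getD n PySem.Dict.empty) := by
  unfold pvIdxStep pvKeysB
  split
  · rw [PySem.Dict.getD_insert_self, List.foldl_map]
  · rfl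

theorem pvSizes_getD_not_mem (s : List Char) (t : List Int) (n : Int) (hn : n ∉ t)
    (index : PySem.Dict Int (PySem.Dict String Int)) :
    (t.foldl (pvIdxStep s) index).getD n PySem.Dict.empty = index.getD n PySem.Dict.empty := by
  induction t generalizing index with
  | nil => rfl
  | cons a u ih =>
    have hne : n ≠ a := fun h => hn (h ▸ List.mem_cons_self ..)
    have hnu : n ∉ u := fun h => hn (List.mem_cons_of_mem _ h)
    rw [List.foldl_cons, ih hnu, pvIdxStep_getD_ne s index n a hne]

theorem pvSizes_getD (sizes : List Int) (s : List Char)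
    (index : PySem.Dict Int (PySem.Dict String Int)) (n : Int)
    (hnd : sizes.Nodup) (hmem : n ∈ sizes) :
    (sizes.foldl (pvIdxStep s) index).getD n PySem.Dict.empty
      = (pvKeysB n s).foldl (fun d k => d.insert k (d.getD k 0 + 1))
          (index.getD n PySem.Dict.empty) := by
  induction sizes generalizing index with
  | nil => cases hmem
  | cons m t ih =>
    rcases List.nodup_cons.mp hnd with ⟨hmt, hndt⟩
    rw [List.foldl_cons]
    rcases List.mem_cons.mp hmem with h | h
    · subst h
      rw [pvSizes_getD_not_mem s t n hmt, pvIdxStep_getD_self]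
    · have hne : n ≠ m := fun e => hmt (e ▸ h)
      rw [ih _ hndt h, pvIdxStep_getD_ne s index n m hne]

theorem pvBuild_getD (orders : List String) (sizes : List Int)
    (index : PySem.Dict Int (PySem.Dict String Int)) (n : Int)
    (hnd : sizes.Nodup) (hmem : n ∈ sizes) :
    (orders.foldl (fun index order => sizes.foldl (pvIdxStep (sortc order)) index) index).getD n
        PySem.Dict.empty
      = (orders.flatMap (fun order => pvKeysB n (sortc order))).foldl
          (fun d k => d.insert k (d.getD k 0 + 1)) (index.getD n PySem.Dict.empty) := by
  induction orders generalizing index with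
  | nil => rfl
  | cons o t ih =>
    rw [List.foldl_cons, ih, pvSizes_getD sizes (sortc o) index n hnd hmem,
        List.flatMap_cons, List.foldl_append]

-- B's index, projected at any size of the course, is the counter of its key list
theorem pvIndexB_eq_counter (orders : List String) (course : List Int) (n : Int)
    (hn : n ∈ course) :
    (orders.foldl (fun index order =>
        (PySem.Set.ofList course).foldl (pvIdxStep (sortc order)) index)
        PySem.Dict.empty).getD n PySem.Dict.empty
      = PySem.Dict.counter (orders.flatMap (fun order => pvKeysB n (sortc order))) := by
  rw [pvBuild_getD orders _ _ n (PySem.Set.nodup_ofList course)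
      ((PySem.Set.mem_ofList _ _).mpr hn),
    PySem.Dict.getD_empty, PySem.Dict.foldl_insert_getD_add_one_eq_counter]

-- ---- the two key lists are permutations of each other ----

-- B's recursive generator is itertools.combinations (for a non-negative size)
theorem pvCombosB_eq_combinations (s : List Char) (n : Int) (h : 0 ≤ n) :
    pvCombosB s n = PySem.List.combinations s n.toNat := by
  induction s generalizing n with
  | nil =>
    rw [pvCombosB]
    split
    · subst ‹n = 0›; rw [Int.toNat_zero, PySem.List.combinations_zero]
    · have : n.toNat = (n.toNat - 1) + 1 := by omega
      rw [this, PySem.List.combinations_nil_succ]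
  | cons x rest ih =>
    rw [pvCombosB]
    split
    · subst ‹n = 0›; rw [Int.toNat_zero, PySem.List.combinations_zero]
    · rw [ih (n - 1) (by omega), ih n h]
      have ht : n.toNat = (n - 1).toNat + 1 := by omega
      rw [ht, PySem.List.combinations_cons_succ]

-- combinations of a list, each taken as a multiset, are permutation-invariant in the list
-- (both sides are List.sublistsLen up to permutation, and that is Multiset.powersetCard)
theorem pvComb_perm_sublistsLen {α : Type} (l : List α) (r : ℕ) :
    (PySem.List.combinations l r).Perm (List.sublistsLen r l) := by
  induction l generalizing r with
  | nil =>
    cases r with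
    | zero => rw [PySem.List.combinations_zero]; rfl
    | succ r => rw [PySem.List.combinations_nil_succ, List.sublistsLen_succ_nil]
  | cons x t ih =>
    cases r with
    | zero => rw [PySem.List.combinations_zero, List.sublistsLen_zero]
    | succ r =>
      rw [PySem.List.combinations_cons_succ, List.sublistsLen_succ_cons]
      exact (((ih r).map _).append (ih (r + 1))).trans (List.perm_append_comm)

theorem pvComb_ms_perm {l l' : List Char} (h : l.Perm l') (r : ℕ) :
    ((PySem.List.combinations l r).map (fun c : List Char => (c : Multiset Char))).Perm
      ((PySem.List.combinations l' r).map (fun c : List Char => (c : Multiset Char))) := by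
  have e1 := (pvComb_perm_sublistsLen l r).map (fun c : List Char => (c : Multiset Char))
  have e2 := (pvComb_perm_sublistsLen l' r).map (fun c : List Char => (c : Multiset Char))
  refine e1.trans (.trans ?_ e2.symm)
  rw [← Multiset.coe_eq_coe]
  have hp : (l : Multiset Char) = (l' : Multiset Char) := Multiset.coe_eq_coe.mpr h
  calc ((List.sublistsLen r l).map (fun c : List Char => (c : Multiset Char)) : Multiset (Multiset Char))
      = Multiset.powersetCard r (l : Multiset Char) := by
        rw [Multiset.powersetCard_coe]
    _ = Multiset.powersetCard r (l' : Multiset Char) := by rw [hp]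
    _ = ((List.sublistsLen r l').map (fun c : List Char => (c : Multiset Char)) : Multiset (Multiset Char)) := by
        rw [Multiset.powersetCard_coe]

-- the sorted-join key of a combination depends only on its multiset of characters
def pvG (m : Multiset Char) : String := String.mk (m.sort (· ≤ ·))

theorem pvKeyA_eq_g (c : List Char) : pvKeyA c = pvG (c : Multiset Char) := by
  unfold pvKeyA pvG
  congr 1
  refine PySem.List.eq_of_perm_of_pairwise_le_of_injective (fun x : Char => x)
    (fun a b hab => hab) ?_ ?_ ?_
  · exact (PySem.List.sorted_perm c _ _).trans
      (Multiset.coe_eq_coe.mp (Multiset.sort_eq (c : Multiset Char) (· ≤ ·))).symm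
  · exact PySem.List.sorted_pairwise c _
  · exact Multiset.sort_sorted (c : Multiset Char) (· ≤ ·)

theorem pvMap_keyA_perm {l l' : List Char} (h : l.Perm l') (r : ℕ) :
    ((PySem.List.combinations l r).map pvKeyA).Perm
      ((PySem.List.combinations l' r).map pvKeyA) := by
  have e : ∀ (L : List (List Char)),
      L.map pvKeyA = (L.map (fun c : List Char => (c : Multiset Char))).map pvG := by
    intro L
    rw [List.map_map]
    exact List.map_congr_left (fun c _ => pvKeyA_eq_g c)
  rw [e, e]
  exact (pvComb_ms_perm h r).map pvG

-- on an already-sorted list every combination is sorted, so its key is itself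
theorem pvMap_keyA_of_sorted (s : List Char) (hs : List.Pairwise (· ≤ ·) s) (r : ℕ) :
    (PySem.List.combinations s r).map pvKeyA = (PySem.List.combinations s r).map String.mk := by
  refine List.map_congr_left (fun c hc => ?_)
  have hsub : c.Sublist s := ((PySem.List.mem_combinations_iff s r c).mp hc).1
  unfold pvKeyA
  rw [PySem.List.sorted_eq_self_of_pairwise c (fun x => x) (List.Pairwise.sublist hsub hs)]

-- per order: A's keys (combinations of the raw order, then sorted) are a permutation of
-- B's keys (the recursive generator on the sorted order)
theorem pvKeys_perm (n : Int) (hn : 0 ≤ n) (order : String) :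
    (pvKeysA n order).Perm (pvKeysB n (sortc order)) := by
  unfold pvKeysA pvKeysB sortc
  rw [PySem.List.length_sorted]
  split
  · rw [pvCombosB_eq_combinations _ _ hn,
      ← pvMap_keyA_of_sorted _ (PySem.List.sorted_pairwise order.toList (fun c => c)) n.toNat]
    exact pvMap_keyA_perm (PySem.List.sorted_perm order.toList (fun c => c) false).symm n.toNat
  · exact List.Perm.refl []

-- ---- counters of permuted key lists select permuted answers ----

theorem pvFlatMap_perm {α β : Type} (l : List α) (f g : α → List β)
    (h : ∀ a ∈ l, (f a).Perm (g a)) : (l.flatMap f).Perm (l.flatMap g) := by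
  induction l with
  | nil => rfl
  | cons a t ih =>
    rw [List.flatMap_cons, List.flatMap_cons]
    exact (h a (List.mem_cons_self ..)).append (ih (fun b hb => h b (List.mem_cons_of_mem _ hb)))

theorem pvMax_id_perm {v1 v2 : List Int} (h : v1.Perm v2) :
    PySem.List.max? v1 (fun v => v) = PySem.List.max? v2 (fun v => v) := by
  cases h1 : PySem.List.max? v1 (fun v => v) with
  | none =>
    rw [PySem.List.max?_eq_none_iff] at h1
    subst h1
    rw [(PySem.List.max?_eq_none_iff v2 _).mpr h.symm.eq_nil]
  | some m =>
    cases h2 : PySem.List.max? v2 (fun v => v) with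
    | none =>
      rw [PySem.List.max?_eq_none_iff] at h2
      subst h2
      rw [(PySem.List.max?_eq_none_iff v1 _).mpr h.eq_nil] at h1
      cases h1
    | some m' =>
      have hle : m ≤ m' := PySem.List.max?_isMax h2 m (h.mem_iff.mp (PySem.List.max?_mem h1))
      have hge : m' ≤ m := PySem.List.max?_isMax h1 m' (h.mem_iff.mpr (PySem.List.max?_mem h2))
      rw [le_antisymm hle hge]

theorem pvTail_counter_perm {K1 K2 : List String} (h : K1.Perm K2) :
    (pvTail (PySem.Dict.counter K1)).Perm (pvTail (PySem.Dict.counter K2)) := by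
  have hkeys : (PySem.Set.ofList K1 : List String).Perm (PySem.Set.ofList K2) :=
    (List.perm_ext_iff_of_nodup (PySem.Set.nodup_ofList K1) (PySem.Set.nodup_ofList K2)).mpr
      (fun a => by rw [PySem.Set.mem_ofList, PySem.Set.mem_ofList]; exact h.mem_iff)
  have hvals : (PySem.Dict.counter K1).values.Perm (PySem.Dict.counter K2).values := by
    simp only [PySem.Dict.values, PySem.Dict.items_counter, List.map_map]
    have e2 : ((fun p : String × Int => p.2) ∘ fun k => (k, (List.count k K2 : Int)))
        = fun k : String => ((List.count k K1 : Int)) :=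
      funext (fun k => by simp [h.count_eq k])
    rw [e2]
    exact hkeys.map _
  rcases hm : PySem.List.max? (PySem.Dict.counter K2).values (fun v => v) with _ | m
  · have e1 : pvTail (PySem.Dict.counter K1) = [] := by
      simp [pvTail, pvMax_id_perm hvals, hm]
    have e2 : pvTail (PySem.Dict.counter K2) = [] := by simp [pvTail, hm]
    rw [e1, e2]
  · have e1 : pvTail (PySem.Dict.counter K1)
        = (if 2 ≤ m then (PySem.Dict.counter K1).keys.filter
            (fun k => decide ((PySem.Dict.counter K1).getD k 0 = m)) else []) := by
      simp only [pvTail, pvMax_id_perm hvals, hm]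
    have e2 : pvTail (PySem.Dict.counter K2)
        = (if 2 ≤ m then (PySem.Dict.counter K2).keys.filter
            (fun k => decide ((PySem.Dict.counter K2).getD k 0 = m)) else []) := by
      simp only [pvTail, hm]
    rw [e1, e2]
    split
    · simp only [PySem.Dict.keys_counter, PySem.Dict.getD_counter]
      have ep : (fun k : String => decide ((List.count k K1 : Int) = m))
          = (fun k : String => decide ((List.count k K2 : Int) = m)) := by
        funext k; rw [h.count_eq k]
      rw [ep]
      exact hkeys.filter _
    · exact List.Perm.refl []

-- the answer fold is the flatMap of per-size tails
theorem pvAnswer_eq_flatMap (course : List Int) (d : Int → PySem.Dict String Int) :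
    course.foldl (fun ans n => pvQuery (d n) ans) [] = course.flatMap (fun n => pvTail (d n)) := by
  rw [PySem.List.foldl_congr_mem _ _ (fun ans n => ans ++ pvTail (d n)) _
      (fun ans n _ => pvQuery_eq_append (d n) ans),
    PySem.List.foldl_append_eq_flatMap]
  rfl

-- ===== VERDICT (by name: the statements are the Claim_ definitions above) =====
theorem solution_spec : Claim_equal_solution := by
  intro orders course _ hpre
  show solution orders course = solution_alt orders course
  show PySem.List.sorted
      (course.foldl (fun answer n => pvQuery (pvCandA n orders) answer) []) (fun s => s) false
    = PySem.List.sorted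
      (course.foldl (fun answer n =>
        pvQuery ((orders.foldl (fun index order =>
            (PySem.Set.ofList course).foldl (pvIdxStep (sortc order)) index)
            PySem.Dict.empty).getD n PySem.Dict.empty) answer) []) (fun s => s) false
  rw [PySem.List.sorted_id_eq_sorted_id_iff_perm,
    pvAnswer_eq_flatMap course (fun n => pvCandA n orders),
    pvAnswer_eq_flatMap course (fun n =>
      (orders.foldl (fun index order =>
          (PySem.Set.ofList course).foldl (pvIdxStep (sortc order)) index)
          PySem.Dict.empty).getD n PySem.Dict.empty)]
  refine pvFlatMap_perm course _ _ (fun n hn => ?_)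
  rw [pvCandA_eq_counter n orders, pvIndexB_eq_counter orders course n hn]
  refine pvTail_counter_perm (pvFlatMap_perm orders _ _ (fun order ho => ?_))
  rcases hpre with he | hpos
  · subst he; cases ho
  · exact pvKeys_perm n (hpos n hn) order
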